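-- pv_equiv track=rewrite | github.com/mrigankpawagi/ProbeableProblems | code/q3/ok/17_1.py | min_freq
-- ===== SOURCE A (Python) =====
-- def min_freq(numbers):
--     # Create a dictionary to store the frequency of each number
--     freq_dict = {}
--
--     # Populate the frequency dictionary
--     for num in numbers:
--         if num in freq_dict:
--             freq_dict[num] += 1
--         else:
--             freq_dict[num] = 1
--
--     # Find the minimum frequency
--     min_frequency = min(freq_dict.values())
--
--     # Find the smallest number with the minimum frequency
--     min_freq_number = min(num for num, freq in freq_dict.items() if freq == min_frequency)
--
--     return min_freq_number
-- ===== SOURCE B (Python) =====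
-- def min_freq(numbers):
--     # Sort, then scan runs of equal values: the first run with a strictly
--     # smaller length than any seen so far wins, so ties on frequency keep
--     # the earlier (= smaller, since sorted) value.
--     xs = sorted(numbers)
--     best_cnt = None
--     best_val = None
--     i = 0
--     while i < len(xs):
--         j = i
--         while j < len(xs) and xs[j] == xs[i]:
--             j += 1
--         if best_cnt is None or j - i < best_cnt:
--             best_cnt = j - i
--             best_val = xs[i]
--         i = j
--     return best_val
-- ===== Notes on version B (the rewrite author's own statement) =====
-- stated objective: alternative
-- what changed: Replaced the frequency dictionary and the two min-passes over it by sort-then-run-scan: sort the list, walk the runs of equal values once, and keep the first run of strictly minimal length (sorted order makes 'first' mean 'smallest value').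
import Mathlib
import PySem

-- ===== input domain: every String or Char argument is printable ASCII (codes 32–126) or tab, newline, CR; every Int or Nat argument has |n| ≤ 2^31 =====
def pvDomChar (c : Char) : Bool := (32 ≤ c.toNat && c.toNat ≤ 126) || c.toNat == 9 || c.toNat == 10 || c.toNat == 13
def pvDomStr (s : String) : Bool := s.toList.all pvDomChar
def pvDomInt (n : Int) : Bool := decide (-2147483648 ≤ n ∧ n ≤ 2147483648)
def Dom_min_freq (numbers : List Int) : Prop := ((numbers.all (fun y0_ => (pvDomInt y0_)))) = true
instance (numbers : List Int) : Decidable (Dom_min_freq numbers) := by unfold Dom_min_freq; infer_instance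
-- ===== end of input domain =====

-- B replaces A's frequency dictionary and its two min-passes by sort-then-run-scan
-- (objective: alternative algorithm).

-- ===== PORT A =====
def min_freq (numbers : List Int) : Int :=
  -- for num in numbers: if num in freq_dict: freq_dict[num] += 1 else: freq_dict[num] = 1
  let freq_dict : PySem.Dict Int Int :=
    numbers.foldl
      (fun d num =>
        if d.contains num then d.insert num (d.getD num 0 + 1)
        else d.insert num 1)
      PySem.Dict.empty
  -- min_frequency = min(freq_dict.values())   (ValueError on empty → default unreached under Pre_)
  match PySem.List.min? freq_dict.values (fun v => v) with
  | none => 0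
  | some min_frequency =>
    -- min(num for num, freq in freq_dict.items() if freq == min_frequency)
    match PySem.List.min?
        (((freq_dict.items.filter (fun p => p.2 == min_frequency)).map (fun p => p.1)))
        (fun v => v) with
    | none => 0
    | some min_freq_number => min_freq_number

-- ===== PORT B =====
-- the two while-loops of Source B: the inner 'while xs[j] == xs[i]' advance is the
-- takeWhile/dropWhile split of the current run (exact on every input), the outer
-- while-loop is the recursion on the remaining suffix; best = Option (cnt, val).
def bscan : List Int → Option (Int × Int) → Option (Int × Int)
  | [], best => best
  | x :: t, best =>
    bscan (t.dropWhile (fun y => y == x))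
      (let c : Int := 1 + (t.takeWhile (fun y => y == x)).length
       match best with
       | none => some (c, x)
       | some (bc, bv) => if c < bc then some (c, x) else some (bc, bv))
  termination_by ys _ => ys.length
  decreasing_by
    simp only [List.length_cons]
    have := List.length_dropWhile_le (p := fun y => y == x) (l := t)
    omega

def min_freq_alt (numbers : List Int) : Int :=
  -- xs = sorted(numbers); run scan; 'return best_val' (None unreached under Pre_ → default 0)
  match bscan (PySem.List.sorted numbers (fun n => n) false) none with
  | none => 0
  | some (_, best_val) => best_val

-- ===== PRECONDITION & SPEC =====
-- Pre_ excludes only the empty list, on which A (min of an empty sequence) raises ValueError.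
def Pre_min_freq (numbers : List Int) : Prop := numbers ≠ []
instance (numbers : List Int) : Decidable (Pre_min_freq numbers) := by unfold Pre_min_freq; infer_instance
def pvWitness_min_freq : List Int := [1, 2, 2]

def Spec_min_freq (numbers : List Int) (out : Int) : Prop := out = min_freq_alt numbers
instance (numbers : List Int) (out : Int) : Decidable (Spec_min_freq numbers out) := by unfold Spec_min_freq; infer_instance

-- ===== CLAIM (what is proved, stated in full; the proofs are below) =====
def Claim_equal_min_freq : Prop := ∀ (numbers : List Int), Dom_min_freq numbers → Pre_min_freq numbers → Spec_min_freq numbers (min_freq numbers)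

-- ===== LEMMAS AND PROOFS =====

-- lexicographic "less or equal" on (key, value)
def Le2 (k : Int → Int) (a b : Int) : Prop := k a < k b ∨ (k a = k b ∧ a ≤ b)

-- A written as one keyed min over the distinct elements (proof-only helper)
def keyedMin (numbers : List Int) : Int :=
  match PySem.List.min2? (PySem.Set.ofList numbers)
      (fun n => (numbers.count n : Int)) (fun n => n) with
  | none => 0
  | some r => r

-- the fold step of min2? with second key = identity
def mstep (k : Int → Int) (acc : Option Int) (x : Int) : Option Int :=
  match acc with
  | none => some x
  | some m =>
    if (decide (k x < k m) || !decide (k m < k x) && decide (x < m)) = true then some x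
    else some m

theorem min2?_eq_foldl (k : Int → Int) (xs : List Int) :
    PySem.List.min2? xs k (fun n => n) = xs.foldl (mstep k) none := by
  unfold PySem.List.min2? mstep
  congr 1
  funext acc x
  cases acc <;> rfl

theorem mstep_none (k : Int → Int) (x : Int) : mstep k none x = some x := rfl

theorem le2_refl (k : Int → Int) (a : Int) : Le2 k a a := Or.inr ⟨rfl, le_refl a⟩

theorem le2_trans {k : Int → Int} {a b c : Int} (h1 : Le2 k a b) (h2 : Le2 k b c) : Le2 k a c := by
  rcases h1 with h1 | ⟨h1, h1'⟩ <;> rcases h2 with h2 | ⟨h2, h2'⟩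
  · exact Or.inl (lt_trans h1 h2)
  · exact Or.inl (h2 ▸ h1)
  · exact Or.inl (h1 ▸ h2)
  · exact Or.inr ⟨h1.trans h2, le_trans h1' h2'⟩

theorem le2_antisymm {k : Int → Int} {a b : Int} (h1 : Le2 k a b) (h2 : Le2 k b a) : a = b := by
  rcases h1 with h1 | ⟨h1, h1'⟩ <;> rcases h2 with h2 | ⟨h2, h2'⟩ <;> omega

-- the pick condition of min2?'s fold step is exactly ¬ Le2
theorem min2?_step_cond (k : Int → Int) (m x : Int) :
    ((decide (k x < k m) || !decide (k m < k x) && decide (x < m)) = true) ↔ ¬ Le2 k m x := by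
  simp only [Le2, Bool.or_eq_true, Bool.and_eq_true, Bool.not_eq_true', decide_eq_true_eq,
    decide_eq_false_iff_not]
  constructor
  · rintro (h | ⟨h1, h2⟩) <;> rintro (h' | ⟨h', h''⟩) <;> omega
  · intro h
    by_cases hk : k x < k m
    · exact Or.inl hk
    · refine Or.inr ⟨fun hm => h (Or.inl hm), ?_⟩
      by_cases he : k m = k x
      · by_contra hxm; exact h (Or.inr ⟨he, by omega⟩)
      · omega

-- invariant of min2?'s fold starting from `some a`
theorem min2?_go (k : Int → Int) (l : List Int) : ∀ (a m : Int),
    l.foldl (mstep k) (some a) = some m →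
    (m = a ∨ m ∈ l) ∧ Le2 k m a ∧ ∀ y ∈ l, Le2 k m y := by
  induction l with
  | nil => intro a m h; simp at h; simp_all [le2_refl]
  | cons x t ih =>
    intro a m h
    simp only [List.foldl_cons, mstep] at h
    by_cases hc : ((decide (k x < k a) || !decide (k a < k x) && decide (x < a)) = true)
    · rw [if_pos hc] at h
      obtain ⟨hmem, hle, hall⟩ := ih x m h
      have hxa : Le2 k x a := by
        rw [min2?_step_cond] at hc
        rcases (by omega : k a < k x ∨ k x < k a ∨ k a = k x) with h1 | h1 | h1
        · exact absurd (Or.inl h1) hc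
        · exact Or.inl h1
        · refine Or.inr ⟨h1.symm, ?_⟩
          by_contra hax
          exact hc (Or.inr ⟨h1, by omega⟩)
      refine ⟨?_, le2_trans hle hxa, ?_⟩
      · rcases hmem with rfl | hm
        · exact Or.inr (List.mem_cons_self)
        · exact Or.inr (List.mem_cons_of_mem _ hm)
      · intro y hy
        rcases List.mem_cons.mp hy with rfl | hy
        · exact hle
        · exact hall y hy
    · rw [if_neg hc] at h
      obtain ⟨hmem, hle, hall⟩ := ih a m h
      have hax : Le2 k a x := by
        rw [min2?_step_cond, not_not] at hc; exact hc
      refine ⟨?_, hle, ?_⟩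
      · rcases hmem with rfl | hm
        · exact Or.inl rfl
        · exact Or.inr (List.mem_cons_of_mem _ hm)
      · intro y hy
        rcases List.mem_cons.mp hy with rfl | hy
        · exact le2_trans hle hax
        · exact hall y hy

theorem min2?_spec (k : Int → Int) (xs : List Int) (m : Int)
    (h : PySem.List.min2? xs k (fun n => n) = some m) :
    m ∈ xs ∧ ∀ y ∈ xs, Le2 k m y := by
  rw [min2?_eq_foldl] at h
  cases xs with
  | nil => simp at h
  | cons x t =>
    rw [List.foldl_cons, mstep_none] at h
    obtain ⟨hmem, hle, hall⟩ := min2?_go k t x m h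
    refine ⟨?_, ?_⟩
    · rcases hmem with rfl | hm
      · exact List.mem_cons_self
      · exact List.mem_cons_of_mem _ hm
    · intro y hy
      rcases List.mem_cons.mp hy with rfl | hy
      · exact hle
      · exact hall y hy

theorem min2?_foldl_ne_none (k : Int → Int) (l : List Int) : ∀ (a : Int),
    l.foldl (mstep k) (some a) ≠ none := by
  induction l with
  | nil => intro a h; simp at h
  | cons y t ih =>
    intro a
    simp only [List.foldl_cons, mstep]
    by_cases hc : ((decide (k y < k a) || !decide (k a < k y) && decide (y < a)) = true)
    · rw [if_pos hc]; exact ih y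
    · rw [if_neg hc]; exact ih a

theorem min2?_isSome_of_ne_nil (k : Int → Int) (xs : List Int) (hne : xs ≠ []) :
    ∃ m, PySem.List.min2? xs k (fun n => n) = some m := by
  cases hfold : PySem.List.min2? xs k (fun n => n) with
  | some m => exact ⟨m, rfl⟩
  | none =>
    exfalso
    rw [min2?_eq_foldl] at hfold
    cases xs with
    | nil => exact hne rfl
    | cons x t =>
      rw [List.foldl_cons, mstep_none] at hfold
      exact min2?_foldl_ne_none k t x hfold

-- A's frequency loop builds Counter(numbers)
theorem freq_loop_eq_counter (numbers : List Int) :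
    numbers.foldl
      (fun d num =>
        if d.contains num then d.insert num (d.getD num 0 + 1)
        else d.insert num 1)
      PySem.Dict.empty = PySem.Dict.counter numbers := by
  rw [← PySem.Dict.foldl_insert_getD_add_one_eq_counter]
  have hstep : (fun (d : PySem.Dict Int Int) num =>
        if d.contains num then d.insert num (d.getD num 0 + 1)
        else d.insert num 1)
      = (fun (d : PySem.Dict Int Int) num => d.insert num (d.getD num 0 + 1)) := by
    funext d num
    by_cases hc : d.contains num = true
    · rw [if_pos hc]
    · rw [if_neg hc]
      have h0 : d.getD num 0 = 0 := by
        rw [PySem.Dict.contains_eq_isSome_get?] at hc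
        cases hg : d.get? num with
        | none => simp [PySem.Dict.getD, hg]
        | some v => rw [hg] at hc; simp at hc
      rw [h0]
      norm_num
  rw [hstep]

theorem set_ofList_ne_nil {xs : List Int} (h : xs ≠ []) : PySem.Set.ofList xs ≠ [] := by
  cases xs with
  | nil => exact absurd rfl h
  | cons x t =>
    intro hnil
    have : x ∈ PySem.Set.ofList (x :: t) := (PySem.Set.mem_ofList _ _).mpr List.mem_cons_self
    rw [hnil] at this
    exact absurd this (List.not_mem_nil)

-- A equals the keyed min (old two-pass → one-pass argument)
theorem min_freq_eq_keyedMin (numbers : List Int) (h : numbers ≠ []) :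
    min_freq numbers = keyedMin numbers := by
  unfold min_freq keyedMin
  simp only [freq_loop_eq_counter]
  set S : List Int := PySem.Set.ofList numbers with hS
  have hSne : S ≠ [] := set_ofList_ne_nil h
  set c : Int → Int := fun n => (numbers.count n : Int) with hc
  have hitems : (PySem.Dict.counter numbers).items = S.map (fun k => (k, c k)) :=
    PySem.Dict.items_counter numbers
  have hvalues : (PySem.Dict.counter numbers).values = S.map c := by
    simp [PySem.Dict.values, hitems, List.map_map, Function.comp]
  rw [hvalues, hitems]
  obtain ⟨b, hb⟩ := min2?_isSome_of_ne_nil c S hSne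
  obtain ⟨hbS, hbmin⟩ := min2?_spec c S b hb
  simp only [hb]
  have hmapne : S.map c ≠ [] := by simpa using hSne
  cases hm : PySem.List.min? (S.map c) (fun v => v) with
  | none => exact absurd ((PySem.List.min?_eq_none_iff _ _).mp hm) hmapne
  | some m =>
    simp only
    have hm_mem : m ∈ S.map c := PySem.List.min?_mem hm
    have hm_min : ∀ v ∈ S.map c, m ≤ v := by
      intro v hv; exact PySem.List.min?_isMin hm v hv
    have hfilter :
        (((S.map (fun k => (k, c k))).filter (fun p => p.2 == m)).map (fun p => p.1))
          = S.filter (fun n => c n == m) := by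
      rw [List.filter_map, List.map_map]
      have h1 : ((fun p : Int × Int => p.2 == m) ∘ (fun k => (k, c k))) = fun n => c n == m := rfl
      have h2 : ((fun p : Int × Int => p.1) ∘ (fun k : Int => (k, c k))) = id := rfl
      rw [h1, h2, List.map_id]
    rw [hfilter]
    set T : List Int := S.filter (fun n => c n == m)
    have hTne : T ≠ [] := by
      obtain ⟨n, hnS, hcn⟩ := List.mem_map.mp hm_mem
      have : n ∈ T := List.mem_filter.mpr ⟨hnS, by simp [hcn]⟩
      intro hnil; rw [hnil] at this; exact absurd this (List.not_mem_nil)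
    cases ha : PySem.List.min? T (fun v => v) with
    | none => exact absurd ((PySem.List.min?_eq_none_iff _ _).mp ha) hTne
    | some a =>
      simp only
      have haT : a ∈ T := PySem.List.min?_mem ha
      have ha_min : ∀ y ∈ T, a ≤ y := fun y hy => PySem.List.min?_isMin ha y hy
      have haS : a ∈ S := (List.mem_filter.mp haT).1
      have hca : c a = m := by
        have := (List.mem_filter.mp haT).2; simpa using this
      have hmb : m ≤ c b := hm_min (c b) (List.mem_map.mpr ⟨b, hbS, rfl⟩)
      have hba : Le2 c b a := hbmin a haS
      have hcb : c b = m := by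
        rcases hba with h1 | ⟨h1, _⟩ <;> omega
      have hbT : b ∈ T := List.mem_filter.mpr ⟨hbS, by simp [hcb]⟩
      have hab : a ≤ b := ha_min b hbT
      have hba' : b ≤ a := by
        rcases hba with h1 | ⟨_, h1⟩
        · omega
        · exact h1
      have : a = b := le_antisymm hab hba'
      simp [this]

-- the keyed min is the Le2-minimum over the list itself
theorem keyedMin_char (numbers : List Int) (h : numbers ≠ []) :
    keyedMin numbers ∈ numbers ∧
      ∀ y ∈ numbers, Le2 (fun n => (numbers.count n : Int)) (keyedMin numbers) y := by
  unfold keyedMin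
  obtain ⟨b, hb⟩ := min2?_isSome_of_ne_nil (fun n => (numbers.count n : Int))
    (PySem.Set.ofList numbers) (set_ofList_ne_nil h)
  obtain ⟨hbS, hbmin⟩ := min2?_spec _ _ b hb
  rw [hb]
  refine ⟨(PySem.Set.mem_ofList _ _).mp hbS, fun y hy => ?_⟩
  exact hbmin y ((PySem.Set.mem_ofList _ _).mpr hy)

-- lexicographic ≤ on (count, value) pairs
def Lep (p q : Int × Int) : Prop := p.1 < q.1 ∨ (p.1 = q.1 ∧ p.2 ≤ q.2)

theorem lep_refl (p : Int × Int) : Lep p p := Or.inr ⟨rfl, le_refl _⟩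

theorem lep_trans {p q r : Int × Int} (h1 : Lep p q) (h2 : Lep q r) : Lep p r := by
  rcases h1 with h1 | ⟨h1, h1'⟩ <;> rcases h2 with h2 | ⟨h2, h2'⟩ <;>
    first
      | exact Or.inl (by omega)
      | exact Or.inr ⟨by omega, by omega⟩

-- structure of the run split of a sorted cons list
theorem run_facts (x : Int) (t : List Int) (hpw : (x :: t).Pairwise (· ≤ ·)) :
    ((x :: t).count x = (t.takeWhile (fun y => y == x)).length + 1) ∧
    (∀ y ∈ t.dropWhile (fun y => y == x), x < y) ∧
    (t.dropWhile (fun y => y == x)).Pairwise (· ≤ ·) ∧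
    (∀ y ∈ t.dropWhile (fun y => y == x), (x :: t).count y = (t.dropWhile (fun y => y == x)).count y) ∧
    (∀ y ∈ t, y = x ∨ y ∈ t.dropWhile (fun y => y == x)) := by
  have hsplit : t.takeWhile (fun y => y == x) ++ t.dropWhile (fun y => y == x) = t :=
    List.takeWhile_append_dropWhile
  have hrun : ∀ y ∈ t.takeWhile (fun y => y == x), y = x := by
    intro y hy
    have := List.mem_takeWhile_imp hy
    exact eq_of_beq this
  have hx_le : ∀ y ∈ t, x ≤ y := by
    intro y hy
    exact (List.pairwise_cons.mp hpw).1 y hy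
  have hdrop_sub : (t.dropWhile (fun y => y == x)).Sublist t := List.dropWhile_sublist _
  have hdrop_pw : (t.dropWhile (fun y => y == x)).Pairwise (· ≤ ·) :=
    ((List.pairwise_cons.mp hpw).2).sublist hdrop_sub
  have hgt : ∀ y ∈ t.dropWhile (fun y => y == x), x < y := by
    cases hd : t.dropWhile (fun y => y == x) with
    | nil => intro y hy; simp at hy
    | cons r0 r' =>
      have hr0_ne : (r0 == x) = false := by
        have := List.head_dropWhile_not (fun y => y == x) (l := t) (by simp [hd])
        simpa [hd] using this
      have hr0_mem : r0 ∈ t := hdrop_sub.subset (hd ▸ List.mem_cons_self)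
      have hr0_gt : x < r0 := lt_of_le_of_ne (hx_le r0 hr0_mem) (by
        intro hxe
        rw [← hxe] at hr0_ne
        simp at hr0_ne)
      intro y hy
      have hpw' := hdrop_pw
      rw [hd] at hpw'
      rcases List.mem_cons.mp hy with rfl | hy'
      · exact hr0_gt
      · have : r0 ≤ y := (List.pairwise_cons.mp hpw').1 y hy'
        omega
  have hx_notin : x ∉ t.dropWhile (fun y => y == x) := by
    intro hx
    exact absurd (hgt x hx) (lt_irrefl x)
  refine ⟨?_, hgt, hdrop_pw, ?_, ?_⟩
  · -- count of x
    have h3 := congrArg (List.count x) hsplit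
    rw [List.count_append] at h3
    have h1 : (t.takeWhile (fun y => y == x)).count x = (t.takeWhile (fun y => y == x)).length :=
      List.count_eq_length.mpr (fun b hb => ((hrun b hb).symm ▸ rfl))
    have h2 : (t.dropWhile (fun y => y == x)).count x = 0 :=
      List.count_eq_zero.mpr hx_notin
    rw [List.count_cons_self]
    omega
  · -- counts of elements of the rest
    intro y hy
    have hyx : x < y := hgt y hy
    have hynx : (y == x) = false := by simp; omega
    have hynotrun : (t.takeWhile (fun y => y == x)).count y = 0 :=
      List.count_eq_zero.mpr (fun hc => by
        have := hrun y hc; omega)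
    have h3 := congrArg (List.count y) hsplit
    rw [List.count_append, hynotrun] at h3
    rw [List.count_cons_of_ne (by omega)]
    omega
  · -- every element of t is x or in the rest
    intro y hy
    rcases List.mem_append.mp (hsplit ▸ hy) with h1 | h1
    · exact Or.inl (hrun y h1)
    · exact Or.inr h1

-- the run-scan invariant: on a sorted suffix whose elements all exceed the held
-- best value, bscan returns the Lep-minimum of the held pair and the run pairs
theorem bscan_go : ∀ (n : Nat) (ys : List Int), ys.length ≤ n →
    ys.Pairwise (· ≤ ·) → ∀ (bc bv : Int), (∀ y ∈ ys, bv < y) →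
    ∃ cm m, bscan ys (some (bc, bv)) = some (cm, m) ∧
      ((cm = bc ∧ m = bv) ∨ (m ∈ ys ∧ cm = (ys.count m : Int))) ∧
      Lep (cm, m) (bc, bv) ∧
      (∀ y ∈ ys, Lep (cm, m) ((ys.count y : Int), y)) := by
  intro n
  induction n with
  | zero =>
    intro ys hlen _ bc bv _
    have : ys = [] := List.eq_nil_of_length_eq_zero (Nat.le_zero.mp hlen)
    subst this
    exact ⟨bc, bv, by rw [bscan], Or.inl ⟨rfl, rfl⟩, lep_refl _, by intro y hy; simp at hy⟩
  | succ n ih =>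
    intro ys hlen hpw bc bv hbv
    cases ys with
    | nil =>
      exact ⟨bc, bv, by rw [bscan], Or.inl ⟨rfl, rfl⟩, lep_refl _, by intro y hy; simp at hy⟩
    | cons x t =>
      obtain ⟨hcount_x, hgt, hdrop_pw, hcount_rest, hsplit_mem⟩ := run_facts x t hpw
      set run := t.takeWhile (fun y => y == x) with hrun_def
      set rest := t.dropWhile (fun y => y == x) with hrest_def
      set c : Int := 1 + (run.length : Int) with hc_def
      have hlen_rest : rest.length ≤ n := by
        have h1 : rest.length ≤ t.length := List.length_dropWhile_le _ t
        simp only [List.length_cons] at hlen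
        omega
      have hbv_x : bv < x := hbv x List.mem_cons_self
      have hstep : bscan (x :: t) (some (bc, bv))
          = bscan rest (if c < bc then some (c, x) else some (bc, bv)) := by
        rw [bscan]
      have hcx : ((x :: t).count x : Int) = c := by
        rw [hcount_x]; push_cast; ring
      by_cases hlt : c < bc
      · -- new best (c, x)
        have hrest_gt : ∀ y ∈ rest, x < y := hgt
        obtain ⟨cm, m, hm, horig, hlep, hall⟩ := ih rest hlen_rest hdrop_pw c x hrest_gt
        refine ⟨cm, m, ?_, ?_, ?_, ?_⟩
        · rw [hstep, if_pos hlt]; exact hm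
        · rcases horig with ⟨rfl, rfl⟩ | ⟨hmem, rfl⟩
          · exact Or.inr ⟨List.mem_cons_self, hcx.symm⟩
          · refine Or.inr ⟨List.mem_cons_of_mem _ (List.dropWhile_sublist _ |>.subset hmem), ?_⟩
            rw [hcount_rest m hmem]
        · exact lep_trans hlep (Or.inl hlt)
        · intro y hy
          rcases List.mem_cons.mp hy with rfl | hy'
          · rw [hcx]; exact hlep
          · rcases hsplit_mem y hy' with rfl | hyr
            · rw [hcx]; exact hlep
            · rw [hcount_rest y hyr]; exact hall y hyr
      · -- keep (bc, bv)
        have hrest_gt : ∀ y ∈ rest, bv < y := by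
          intro y hy
          exact hbv y (List.mem_cons_of_mem _ (List.dropWhile_sublist _ |>.subset hy))
        obtain ⟨cm, m, hm, horig, hlep, hall⟩ := ih rest hlen_rest hdrop_pw bc bv hrest_gt
        have hlep_cx : Lep (bc, bv) (c, x) := by
          rcases lt_or_eq_of_le (not_lt.mp hlt) with h1 | h1
          · exact Or.inl h1
          · exact Or.inr ⟨h1, le_of_lt hbv_x⟩
        refine ⟨cm, m, ?_, ?_, hlep, ?_⟩
        · rw [hstep, if_neg hlt]; exact hm
        · rcases horig with ⟨rfl, rfl⟩ | ⟨hmem, rfl⟩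
          · exact Or.inl ⟨rfl, rfl⟩
          · refine Or.inr ⟨List.mem_cons_of_mem _ (List.dropWhile_sublist _ |>.subset hmem), ?_⟩
            rw [hcount_rest m hmem]
        · intro y hy
          rcases List.mem_cons.mp hy with rfl | hy'
          · rw [hcx]; exact lep_trans hlep hlep_cx
          · rcases hsplit_mem y hy' with rfl | hyr
            · rw [hcx]; exact lep_trans hlep hlep_cx
            · rw [hcount_rest y hyr]; exact hall y hyr

-- B returns a Le2-minimum of the input list
theorem min_freq_alt_char (numbers : List Int) (h : numbers ≠ []) :
    min_freq_alt numbers ∈ numbers ∧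
      ∀ y ∈ numbers, Le2 (fun n => (numbers.count n : Int)) (min_freq_alt numbers) y := by
  unfold min_freq_alt
  set ys := PySem.List.sorted numbers (fun n => n) false with hys
  have hperm : ys.Perm numbers := PySem.List.sorted_perm ..
  have hpw : ys.Pairwise (· ≤ ·) := by
    have := PySem.List.sorted_pairwise (xs := numbers) (key := fun n : Int => n)
    simpa using this
  have hcount : ∀ v : Int, ys.count v = numbers.count v := fun v => hperm.count_eq v
  cases hys_shape : ys with
  | nil =>
    exfalso
    have hp := hperm.symm
    rw [hys_shape] at hp
    exact h hp.eq_nil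
  | cons x t =>
    obtain ⟨hcount_x, hgt, hdrop_pw, hcount_rest, hsplit_mem⟩ :=
      run_facts x t (hys_shape ▸ hpw)
    set rest := t.dropWhile (fun y => y == x) with hrest_def
    set c : Int := 1 + ((t.takeWhile (fun y => y == x)).length : Int) with hc_def
    have hstep : bscan (x :: t) none = bscan rest (some (c, x)) := by rw [bscan]
    obtain ⟨cm, m, hm, horig, hlep, hall⟩ :=
      bscan_go rest.length rest (le_refl _) hdrop_pw c x hgt
    have hcx : ((x :: t).count x : Int) = c := by rw [hcount_x]; push_cast; ring
    have hm_mem_ys : m ∈ (x :: t) ∧ cm = ((x :: t).count m : Int) := by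
      rcases horig with ⟨rfl, rfl⟩ | ⟨hmem, rfl⟩
      · exact ⟨List.mem_cons_self, hcx.symm⟩
      · exact ⟨List.mem_cons_of_mem _ (List.dropWhile_sublist _ |>.subset hmem),
          (hcount_rest m hmem).symm ▸ rfl⟩
    have hall_ys : ∀ y ∈ (x :: t), Lep (cm, m) (((x :: t).count y : Int), y) := by
      intro y hy
      rcases List.mem_cons.mp hy with rfl | hy'
      · rw [hcx]; exact hlep
      · rcases hsplit_mem y hy' with rfl | hyr
        · rw [hcx]; exact hlep
        · rw [hcount_rest y hyr]; exact hall y hyr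
    rw [hstep, hm]
    show m ∈ numbers ∧ ∀ y ∈ numbers, Le2 (fun n => (numbers.count n : Int)) m y
    have hm_num : m ∈ numbers := hperm.subset (hys_shape ▸ hm_mem_ys.1)
    refine ⟨hm_num, fun y hy => ?_⟩
    have hy_ys : y ∈ (x :: t) := hys_shape ▸ hperm.mem_iff.mpr hy
    have hlp := hall_ys y hy_ys
    have hcnt_y : (x :: t).count y = numbers.count y := by
      rw [← hcount y, hys_shape]
    have hcnt_m : cm = ((numbers.count m : Nat) : Int) := by
      rw [hm_mem_ys.2, ← hcount m, hys_shape]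
    simp only [Le2, Lep] at hlp ⊢
    omega

-- ===== VERDICT (by name: the statement is the Claim_ definition above) =====
theorem min_freq_spec : Claim_equal_min_freq := by
  intro numbers _ hpre
  unfold Spec_min_freq
  obtain ⟨haM, haMin⟩ := keyedMin_char numbers hpre
  obtain ⟨hbM, hbMin⟩ := min_freq_alt_char numbers hpre
  rw [min_freq_eq_keyedMin numbers hpre]
  exact le2_antisymm (haMin _ hbM) (hbMin _ haM)
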